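-- pv_equiv track=rewrite | github.com/Braininhood/Portfolio | Testing/test_plates/plates.py | numbers_at_end
-- ===== SOURCE A (Python) =====
-- def numbers_at_end(s: str) -> bool:
--     """Check if numbers appear only at the end and the first number is not '0'."""
--     has_number = False
--     for i, char in enumerate(s):
--         if char.isdigit():
--             # Ensure all following characters are digits
--             if not has_number and char == '0':
--                 return False  # First number cannot be '0'
--             has_number = True
--         elif has_number:
--             return False  # Letters found after numbers
--     return True
-- ===== SOURCE B (Python) =====
-- def numbers_at_end(s: str) -> bool:
--     """Check if numbers appear only at the end and the first number is not '0'."""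
--     i = 0
--     n = len(s)
--     while i < n and not s[i].isdigit():
--         i += 1
--     if i == n:
--         return True  # no digit at all
--     if s[i] == '0':
--         return False  # first digit cannot be '0'
--     return s[i:].isdigit()  # everything after the first digit must be digits
-- ===== Notes on version B (the rewrite author's own statement) =====
-- stated objective: simpler
-- what changed: Replaces A's single stateful scan carrying a has_number flag with two phases: skip to the first digit, then decide directly from that digit being nonzero and the remaining slice being all digits.
import Mathlib
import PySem

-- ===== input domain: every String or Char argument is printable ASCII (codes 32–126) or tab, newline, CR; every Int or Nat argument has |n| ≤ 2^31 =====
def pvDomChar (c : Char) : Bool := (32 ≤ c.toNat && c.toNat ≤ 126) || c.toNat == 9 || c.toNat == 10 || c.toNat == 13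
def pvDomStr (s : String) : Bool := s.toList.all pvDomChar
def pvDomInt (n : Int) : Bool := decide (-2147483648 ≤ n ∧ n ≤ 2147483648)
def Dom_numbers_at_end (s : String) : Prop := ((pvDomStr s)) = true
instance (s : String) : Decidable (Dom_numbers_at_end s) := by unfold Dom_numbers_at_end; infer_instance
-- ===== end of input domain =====

-- B: two-phase decomposition (skip to first digit, then decide) instead of A's stateful flag scan; same O(n) cost.
-- ===== PORT A =====
-- the for-loop of A, carrying the has_number flag
def pvGoA : List Char → Bool → Bool
  | [], _ => true
  | c :: cs, h =>
    if PySem.Chars.isdigit c then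
      if !h && (c == '0') then false else pvGoA cs true
    else if h then false else pvGoA cs h

def numbers_at_end (s : String) : Bool := pvGoA s.toList false

-- ===== PORT B =====
-- the while-loop of B: drop characters until the first digit
def pvSkip : List Char → List Char
  | [] => []
  | c :: cs => if PySem.Chars.isdigit c then c :: cs else pvSkip cs

def numbers_at_end_alt (s : String) : Bool :=
  match pvSkip s.toList with
  | [] => true
  | c :: cs => if c == '0' then false else (c :: cs).all PySem.Chars.isdigit

-- ===== PRECONDITION & SPEC =====
def Spec_numbers_at_end (s : String) (out : Bool) : Prop := out = numbers_at_end_alt s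
instance (s : String) (out : Bool) : Decidable (Spec_numbers_at_end s out) := by unfold Spec_numbers_at_end; infer_instance

-- ===== CLAIM (what is proved, stated in full; the proofs are below) =====
def Claim_equal_numbers_at_end : Prop := ∀ (s : String), Dom_numbers_at_end s → Spec_numbers_at_end s (numbers_at_end s)

-- ===== LEMMAS AND PROOFS =====

-- ===== VERDICT (by name: the statement is the Claim_ definition above) =====
theorem pvGoA_true (l : List Char) : pvGoA l true = l.all PySem.Chars.isdigit := by
  induction l with
  | nil => rfl
  | cons c cs ih =>
    simp only [pvGoA, List.all_cons]
    by_cases hd : PySem.Chars.isdigit c <;> simp [hd, ih]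

theorem pvGoA_false (l : List Char) :
    pvGoA l false = (match pvSkip l with
      | [] => true
      | c :: cs => if c == '0' then false else (c :: cs).all PySem.Chars.isdigit) := by
  induction l with
  | nil => rfl
  | cons c cs ih =>
    simp only [pvGoA, pvSkip]
    by_cases hd : PySem.Chars.isdigit c
    · simp [hd, pvGoA_true]
    · simp [hd, ih]

theorem numbers_at_end_spec : Claim_equal_numbers_at_end := by
  intro s _
  unfold Spec_numbers_at_end numbers_at_end numbers_at_end_alt
  exact pvGoA_false s.toList
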